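-- pv_equiv track=rewrite | github.com/941design/dojo | codewars/python/water_pouring_problem.py | wpp
-- ===== SOURCE A (Python) =====
-- def wpp(cap_a, cap_b, target):
--     def g():
--         a, b = 0, 0
--         # Traversing all `k = remainder + n*cap_a` where `k <= cap_b`.
--         # `remainder_n0 = 0`, then `remainder_n1 = cap_a - remainder_n0 + n_max*cap_a`.
--         for _ in range(cap_a):
--             while cap_b - b > cap_a:       # while a can be emptied into b
--                 a, b = cap_a, b                # refill a
--                 yield a, b
--                 a, b = 0, a + b                # empty a into b
--                 yield a, b
--             a, b = cap_a, b                # fill a one last time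
--             yield a, b
--             a, b = a - (cap_b - b), cap_b  # partially empty a into b
--             yield a, b
--             a, b = a, 0                    # keep remainder in a, empty b
--             yield a, b
--             a, b = 0, a                    # empty remainder into b, and start over
--             yield a, b
--     path = []
--     for ab in g():
--         path.append(ab)
--         if target in ab:
--             return path
--     return []
-- ===== SOURCE B (Python) =====
-- def wpp(cap_a, cap_b, target):
--     # Closed-form round enumeration: the number k of full a->b empties per
--     # round is computed by integer division, and each recorded state is
--     # computed from its position index by a formula (no stateful simulation).
--     path = []
--     b = 0
--     for _ in range(cap_a):
--         k = max(0, -((b + cap_a - cap_b) // cap_a))     # inner-loop length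
--         bk = b + k * cap_a
--         rem = cap_a - (cap_b - bk)
--         for p in range(2 * k + 4):
--             if p < 2 * k:
--                 if p % 2 == 0:
--                     st = (cap_a, b + p // 2 * cap_a)
--                 else:
--                     st = (0, b + (p + 1) // 2 * cap_a)
--             else:
--                 st = ((cap_a, bk), (rem, cap_b), (rem, 0), (0, rem))[p - 2 * k]
--             path.append(st)
--             if target in st:
--                 return path
--         b = rem
--     return []
-- ===== Notes on version B (the rewrite author's own statement) =====
-- stated objective: alternative
-- what changed: Replaces A's stateful generator simulation (nested for/while mutating a,b, consumed by a separate loop) with a closed-form round enumeration: the inner-loop length k is computed by one integer division and every recorded state is computed from its position index by an arithmetic formula inside one flat indexed loop.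
import Mathlib
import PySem

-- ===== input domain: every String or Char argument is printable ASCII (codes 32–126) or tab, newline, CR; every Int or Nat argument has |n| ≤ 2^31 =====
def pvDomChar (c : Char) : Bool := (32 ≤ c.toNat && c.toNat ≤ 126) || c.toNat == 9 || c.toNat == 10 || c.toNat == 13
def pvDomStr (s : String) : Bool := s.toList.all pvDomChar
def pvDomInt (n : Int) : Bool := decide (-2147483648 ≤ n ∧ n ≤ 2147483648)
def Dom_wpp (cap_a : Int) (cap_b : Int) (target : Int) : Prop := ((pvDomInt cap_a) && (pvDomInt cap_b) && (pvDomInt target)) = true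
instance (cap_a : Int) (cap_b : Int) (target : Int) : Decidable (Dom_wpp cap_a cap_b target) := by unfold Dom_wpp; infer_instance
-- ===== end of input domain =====

-- B replaces A's stateful generator simulation by a closed-form round
-- enumeration: the inner-loop length is obtained by one integer division and
-- each recorded state is computed from its position index by a formula
-- (objective: alternative algorithm of the same cost; not claimed faster).

-- ===== PORT A =====
-- A is a generator g consumed by a loop that appends each yield to `path` and
-- returns on the first yield containing `target`.  Lean has no lazy
-- generators, so the port fuses each `yield a, b` with the consumer's
-- `path.append((a,b)); if target in ab: return path` (otherwise a strict port
-- would materialise yields Python never asks for); A's loop structure — the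
-- inner `while cap_b - b > cap_a`, the outer `for _ in range(cap_a)`, and the
-- four tail yields with the `a - (cap_b - b)` partial pour — is kept as is.

-- A's inner while loop: either the consumer returned early (.inl path), or the
-- loop finished (.inr (final b, path)).  The `0 < capa` conjunct is a totality
-- guard only: in A this loop runs only inside `for _ in range(cap_a)`, i.e.
-- with cap_a ≥ 1, where it is always true.
def wppInner (capa capb t : Int) (b : Int) (path : Array (Int × Int)) :
    Array (Int × Int) ⊕ Int × Array (Int × Int) :=
  if _h : capb - b > capa ∧ 0 < capa then
    let p1 := path.push (capa, b)                  -- yield cap_a, b (refill a)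
    if t = capa ∨ t = b then .inl p1
    else
      let p2 := p1.push (0, capa + b)              -- yield 0, a + b (empty a into b)
      if t = 0 ∨ t = capa + b then .inl p2
      else wppInner capa capb t (capa + b) p2
  else .inr (b, path)
  termination_by (capb - capa - b).toNat
  decreasing_by omega

-- A's outer `for _ in range(cap_a)` as recursion on the remaining iteration
-- count: the inner while, then the four tail yields, each fused with the
-- consumer's append-and-test.
def wppOuter (capa capb t : Int) : Nat → Int → Array (Int × Int) → Array (Int × Int)
  | 0, _, _ => #[]
  | n + 1, b, path =>
    match wppInner capa capb t b path with
    | .inl p => p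
    | .inr (b1, p1) =>
      let q1 := p1.push (capa, b1)                 -- yield: fill a one last time
      if t = capa ∨ t = b1 then q1
      else
        let a2 := capa - (capb - b1)
        let q2 := q1.push (a2, capb)               -- yield: partially empty a into b
        if t = a2 ∨ t = capb then q2
        else
          let q3 := q2.push (a2, 0)                -- yield: empty b
          if t = a2 ∨ t = 0 then q3
          else
            let q4 := q3.push (0, a2)              -- yield: move remainder into b
            if t = 0 ∨ t = a2 then q4
            else wppOuter capa capb t n a2 q4

def wpp (cap_a : Int) (cap_b : Int) (target : Int) : List (Int × Int) :=
  (wppOuter cap_a cap_b target cap_a.toNat 0 #[]).toList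

-- ===== PORT B =====
-- B computes, per round, the inner-loop length k by integer division and then
-- walks the positions p of the round, computing each state from p by formula.

-- The state at position p of a round (b, bk, rem, kn are the round's data):
-- Python's `p // 2 * cap_a` / `(p + 1) // 2 * cap_a` on the nonnegative loop
-- index p is exactly Nat division here, and the tuple indexing
-- `(...)[p - 2*k]` is the match on p - 2*kn.
def wppPos (capa capb b bk rem : Int) (kn : Nat) (p : Nat) : Int × Int :=
  if p < 2 * kn then
    if p % 2 = 0 then (capa, b + ((p / 2 : Nat) : Int) * capa)
    else (0, b + (((p + 1) / 2 : Nat) : Int) * capa)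
  else
    match p - 2 * kn with
    | 0 => (capa, bk)
    | 1 => (rem, capb)
    | 2 => (rem, 0)
    | _ => (0, rem)

-- B's `for p in range(2*k + 4)` with the append-and-test body: .inl = early
-- `return path`, .inr = the round finished.
def wppRoundLoop (capa capb t b bk rem : Int) (kn : Nat) (p : Nat)
    (path : Array (Int × Int)) : Array (Int × Int) ⊕ Array (Int × Int) :=
  if _h : p < 2 * kn + 4 then
    if t = (wppPos capa capb b bk rem kn p).1 ∨ t = (wppPos capa capb b bk rem kn p).2 then
      .inl (path.push (wppPos capa capb b bk rem kn p))
    else wppRoundLoop capa capb t b bk rem kn (p + 1) (path.push (wppPos capa capb b bk rem kn p))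
  else .inr path
  termination_by 2 * kn + 4 - p

-- B's outer `for _ in range(cap_a)`, recursion on the remaining round count.
def wppRounds (capa capb t : Int) : Nat → Int → Array (Int × Int) → Array (Int × Int)
  | 0, _, _ => #[]
  | n + 1, b, path =>
    let k := max 0 (-(PySem.Int.floordiv (b + capa - capb) capa))
    let bk := b + k * capa
    let rem := capa - (capb - bk)
    match wppRoundLoop capa capb t b bk rem k.toNat 0 path with
    | .inl p => p
    | .inr p => wppRounds capa capb t n rem p

def wpp_alt (cap_a : Int) (cap_b : Int) (target : Int) : List (Int × Int) :=
  (wppRounds cap_a cap_b target cap_a.toNat 0 #[]).toList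

-- ===== PRECONDITION & SPEC =====
def Spec_wpp (cap_a : Int) (cap_b : Int) (target : Int) (out : List (Int × Int)) : Prop := out = wpp_alt cap_a cap_b target
instance (cap_a : Int) (cap_b : Int) (target : Int) (out : List (Int × Int)) : Decidable (Spec_wpp cap_a cap_b target out) := by unfold Spec_wpp; infer_instance

-- ===== CLAIM (what is proved, stated in full; the proofs are below) =====
def Claim_equal_wpp : Prop := ∀ (cap_a : Int) (cap_b : Int) (target : Int), Dom_wpp cap_a cap_b target → Spec_wpp cap_a cap_b target (wpp cap_a cap_b target)

-- ===== LEMMAS AND PROOFS =====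

-- Characterisation of B's division-computed k: it is exactly the number of
-- iterations A's inner `while cap_b - b > cap_a` performs from b.
lemma k_facts (capa capb b : Int) (hca : 0 < capa) :
    0 ≤ max 0 (-(PySem.Int.floordiv (b + capa - capb) capa)) ∧
    ¬ (capb - (b + max 0 (-(PySem.Int.floordiv (b + capa - capb) capa)) * capa) > capa) ∧
    (∀ j : Nat, (j : Int) < max 0 (-(PySem.Int.floordiv (b + capa - capb) capa)) →
      capb - (b + (j : Int) * capa) > capa) := by
  rw [PySem.Int.floordiv_eq_ediv_of_pos hca]
  set x := b + capa - capb with hx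
  set q := x / capa with hq
  have hdm : capa * q + x % capa = x := Int.mul_ediv_add_emod x capa
  have hr0 : 0 ≤ x % capa := Int.emod_nonneg x (ne_of_gt hca)
  have hr1 : x % capa < capa := Int.emod_lt_of_pos x hca
  rcases le_or_gt 0 q with hq0 | hq0
  · have hk : max 0 (-q) = 0 := by omega
    rw [hk]
    have hm0 : 0 ≤ capa * q := mul_nonneg (le_of_lt hca) hq0
    refine ⟨le_refl 0, by omega, ?_⟩
    intro j hj
    omega
  · have hk : max 0 (-q) = -q := by omega
    rw [hk]
    have hqc : (-q) * capa = -(capa * q) := by ring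
    refine ⟨by omega, by omega, ?_⟩
    intro j hj
    have hj' : (j : Int) ≤ -q - 1 := by omega
    have hmul : (j : Int) * capa ≤ (-q - 1) * capa :=
      mul_le_mul_of_nonneg_right hj' (le_of_lt hca)
    have : (-q - 1) * capa = -(capa * q) - capa := by ring
    omega

-- Evaluating B's position formula at the inner even positions …
lemma wppPos_even (capa capb b bk rem : Int) (kn j : Nat) (hj : j < kn) :
    wppPos capa capb b bk rem kn (2 * j) = (capa, b + (j : Int) * capa) := by
  unfold wppPos
  rw [if_pos (by omega), if_pos (by omega)]
  rw [Nat.mul_div_cancel_left j (by norm_num)]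

-- … the inner odd positions …
lemma wppPos_odd (capa capb b bk rem : Int) (kn j : Nat) (hj : j < kn) :
    wppPos capa capb b bk rem kn (2 * j + 1) = (0, b + ((j : Int) + 1) * capa) := by
  unfold wppPos
  rw [if_pos (by omega), if_neg (by omega)]
  have h2 : (2 * j + 1 + 1) / 2 = j + 1 := by omega
  rw [h2]
  push_cast
  ring_nf

-- … and the four tail positions.
lemma wppPos_tail0 (capa capb b bk rem : Int) (kn : Nat) :
    wppPos capa capb b bk rem kn (2 * kn) = (capa, bk) := by
  unfold wppPos
  rw [if_neg (by omega)]
  have : 2 * kn - 2 * kn = 0 := by omega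
  rw [this]

lemma wppPos_tail1 (capa capb b bk rem : Int) (kn : Nat) :
    wppPos capa capb b bk rem kn (2 * kn + 1) = (rem, capb) := by
  unfold wppPos
  rw [if_neg (by omega)]
  have : 2 * kn + 1 - 2 * kn = 1 := by omega
  rw [this]

lemma wppPos_tail2 (capa capb b bk rem : Int) (kn : Nat) :
    wppPos capa capb b bk rem kn (2 * kn + 2) = (rem, 0) := by
  unfold wppPos
  rw [if_neg (by omega)]
  have : 2 * kn + 2 - 2 * kn = 2 := by omega
  rw [this]

lemma wppPos_tail3 (capa capb b bk rem : Int) (kn : Nat) :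
    wppPos capa capb b bk rem kn (2 * kn + 3) = (0, rem) := by
  unfold wppPos
  rw [if_neg (by omega)]
  have : 2 * kn + 3 - 2 * kn = 3 := by omega
  rw [this]

-- One inner (even+odd) pass of B's position loop.
lemma roundLoop_inner (capa capb t b bk rem : Int) (kn j : Nat) (hj : j < kn)
    (path : Array (Int × Int)) :
    wppRoundLoop capa capb t b bk rem kn (2 * j) path =
      (if t = capa ∨ t = b + (j : Int) * capa then
        .inl (path.push (capa, b + (j : Int) * capa))
      else if t = 0 ∨ t = b + ((j : Int) + 1) * capa then
        .inl ((path.push (capa, b + (j : Int) * capa)).push (0, b + ((j : Int) + 1) * capa))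
      else wppRoundLoop capa capb t b bk rem kn (2 * (j + 1))
        ((path.push (capa, b + (j : Int) * capa)).push (0, b + ((j : Int) + 1) * capa))) := by
  conv_lhs => rw [wppRoundLoop]
  rw [dif_pos (by omega : 2 * j < 2 * kn + 4)]
  rw [wppPos_even capa capb b bk rem kn j hj]
  split_ifs with h1 h2
  · rfl
  · conv_lhs => rw [wppRoundLoop]
    rw [dif_pos (by omega : 2 * j + 1 < 2 * kn + 4)]
    rw [wppPos_odd capa capb b bk rem kn j hj]
    rw [if_pos h2]
  · conv_lhs => rw [wppRoundLoop]
    rw [dif_pos (by omega : 2 * j + 1 < 2 * kn + 4)]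
    rw [wppPos_odd capa capb b bk rem kn j hj]
    rw [if_neg h2]
    rw [show 2 * j + 1 + 1 = 2 * (j + 1) from by omega]

-- The tail pass of B's position loop (the last four positions).
lemma roundLoop_tail (capa capb t b bk rem : Int) (kn : Nat)
    (path : Array (Int × Int)) :
    wppRoundLoop capa capb t b bk rem kn (2 * kn) path =
      (if t = capa ∨ t = bk then .inl (path.push (capa, bk))
      else if t = rem ∨ t = capb then
        .inl ((path.push (capa, bk)).push (rem, capb))
      else if t = rem ∨ t = 0 then
        .inl (((path.push (capa, bk)).push (rem, capb)).push (rem, 0))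
      else if t = 0 ∨ t = rem then
        .inl ((((path.push (capa, bk)).push (rem, capb)).push (rem, 0)).push (0, rem))
      else .inr ((((path.push (capa, bk)).push (rem, capb)).push (rem, 0)).push (0, rem))) := by
  conv_lhs => rw [wppRoundLoop]
  rw [dif_pos (by omega : 2 * kn < 2 * kn + 4), wppPos_tail0 capa capb b bk rem kn]
  split_ifs with h1 h2 h3 h4
  · rfl
  · conv_lhs => rw [wppRoundLoop]
    rw [dif_pos (by omega : 2 * kn + 1 < 2 * kn + 4),
      wppPos_tail1 capa capb b bk rem kn, if_pos h2]
  · conv_lhs => rw [wppRoundLoop]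
    rw [dif_pos (by omega : 2 * kn + 1 < 2 * kn + 4),
      wppPos_tail1 capa capb b bk rem kn, if_neg h2,
      show 2 * kn + 1 + 1 = 2 * kn + 2 from rfl]
    conv_lhs => rw [wppRoundLoop]
    rw [dif_pos (by omega : 2 * kn + 2 < 2 * kn + 4),
      wppPos_tail2 capa capb b bk rem kn, if_pos h3]
  · conv_lhs => rw [wppRoundLoop]
    rw [dif_pos (by omega : 2 * kn + 1 < 2 * kn + 4),
      wppPos_tail1 capa capb b bk rem kn, if_neg h2,
      show 2 * kn + 1 + 1 = 2 * kn + 2 from rfl]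
    conv_lhs => rw [wppRoundLoop]
    rw [dif_pos (by omega : 2 * kn + 2 < 2 * kn + 4),
      wppPos_tail2 capa capb b bk rem kn, if_neg h3,
      show 2 * kn + 2 + 1 = 2 * kn + 3 from rfl]
    conv_lhs => rw [wppRoundLoop]
    rw [dif_pos (by omega : 2 * kn + 3 < 2 * kn + 4),
      wppPos_tail3 capa capb b bk rem kn, if_pos h4]
  · conv_lhs => rw [wppRoundLoop]
    rw [dif_pos (by omega : 2 * kn + 1 < 2 * kn + 4),
      wppPos_tail1 capa capb b bk rem kn, if_neg h2,
      show 2 * kn + 1 + 1 = 2 * kn + 2 from rfl]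
    conv_lhs => rw [wppRoundLoop]
    rw [dif_pos (by omega : 2 * kn + 2 < 2 * kn + 4),
      wppPos_tail2 capa capb b bk rem kn, if_neg h3,
      show 2 * kn + 2 + 1 = 2 * kn + 3 from rfl]
    conv_lhs => rw [wppRoundLoop]
    rw [dif_pos (by omega : 2 * kn + 3 < 2 * kn + 4),
      wppPos_tail3 capa capb b bk rem kn, if_neg h4,
      show 2 * kn + 3 + 1 = 2 * kn + 4 from rfl]
    conv_lhs => rw [wppRoundLoop]
    rw [dif_neg (by omega : ¬ 2 * kn + 4 < 2 * kn + 4)]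

-- A's inner while step (A's outer-iteration body when the inner condition holds).
lemma wppOuter_step (capa capb t : Int) (m : Nat) (b : Int) (path : Array (Int × Int))
    (hc : capb - b > capa) (hcapa : 0 < capa) :
    wppOuter capa capb t (m + 1) b path =
      (if t = capa ∨ t = b then path.push (capa, b)
       else if t = 0 ∨ t = capa + b then ((path.push (capa, b)).push (0, capa + b))
       else wppOuter capa capb t (m + 1) (capa + b) (((path.push (capa, b)).push (0, capa + b)))) := by
  show (match wppInner capa capb t b path with
        | .inl p => p
        | .inr (b1, p1) => _) = _
  rw [wppInner, dif_pos ⟨hc, hcapa⟩]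
  split_ifs <;> rfl

-- A's outer-iteration body when the inner while exits immediately.
lemma wppOuter_exit (capa capb t : Int) (m : Nat) (b : Int) (path : Array (Int × Int))
    (hc : ¬ (capb - b > capa ∧ 0 < capa)) :
    wppOuter capa capb t (m + 1) b path =
      (if t = capa ∨ t = b then path.push (capa, b)
       else if t = capa - (capb - b) ∨ t = capb then
         ((path.push (capa, b)).push (capa - (capb - b), capb))
       else if t = capa - (capb - b) ∨ t = 0 then
         (((path.push (capa, b)).push (capa - (capb - b), capb)).push (capa - (capb - b), 0))
       else if t = 0 ∨ t = capa - (capb - b) then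
         ((((path.push (capa, b)).push (capa - (capb - b), capb)).push (capa - (capb - b), 0)).push (0, capa - (capb - b)))
       else wppOuter capa capb t m (capa - (capb - b))
         (((((path.push (capa, b)).push (capa - (capb - b), capb)).push (capa - (capb - b), 0)).push (0, capa - (capb - b))))) := by
  show (match wppInner capa capb t b path with
        | .inl p => p
        | .inr (b1, p1) => _) = _
  rw [wppInner, dif_neg hc]

-- Unfolding B's round recursion (the let bindings reduce definitionally).
lemma wppRounds_succ (capa capb t : Int) (n : Nat) (b : Int) (path : Array (Int × Int)) :
    wppRounds capa capb t (n + 1) b path =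
      (match wppRoundLoop capa capb t b
          (b + max 0 (-(PySem.Int.floordiv (b + capa - capb) capa)) * capa)
          (capa - (capb - (b + max 0 (-(PySem.Int.floordiv (b + capa - capb) capa)) * capa)))
          (max 0 (-(PySem.Int.floordiv (b + capa - capb) capa))).toNat 0 path with
        | .inl p => p
        | .inr p => wppRounds capa capb t n
            (capa - (capb - (b + max 0 (-(PySem.Int.floordiv (b + capa - capb) capa)) * capa))) p) := rfl

-- Main bridge: A's simulation equals B's closed-form round enumeration.
lemma bridge (capa capb t : Int) (hca : 0 < capa) :
    ∀ (n : Nat) (b : Int) (path : Array (Int × Int)),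
      wppOuter capa capb t n b path = wppRounds capa capb t n b path := by
  intro n
  induction n with
  | zero => intro b path; rfl
  | succ n ih =>
    intro b path
    obtain ⟨hk0, hF2, hF3⟩ := k_facts capa capb b hca
    set k := max 0 (-(PySem.Int.floordiv (b + capa - capb) capa)) with hkdef
    set kn := k.toNat with hkndef
    have hknk : (kn : Int) = k := Int.toNat_of_nonneg hk0
    set bk := b + k * capa with hbk
    set rem := capa - (capb - bk) with hrem
    rw [wppRounds_succ]
    -- walk A's inner while and B's position loop in lockstep
    suffices H : ∀ (d j : Nat), j + d = kn → ∀ (path : Array (Int × Int)),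
        wppOuter capa capb t (n + 1) (b + (j : Int) * capa) path =
          (match wppRoundLoop capa capb t b bk rem kn (2 * j) path with
            | .inl p => p
            | .inr p => wppRounds capa capb t n rem p) by
      have h0 := H kn 0 (by omega) path
      simpa using h0
    intro d
    induction d with
    | zero =>
      intro j hj path
      have hjkn : j = kn := by omega
      subst hjkn
      rw [hknk]
      have hc : ¬ (capb - (b + k * capa) > capa ∧ 0 < capa) := by
        intro h; exact hF2 h.1
      rw [wppOuter_exit capa capb t n (b + k * capa) path hc]
      rw [roundLoop_tail capa capb t b bk rem kn path]
      rw [← hbk, ← hrem]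
      split_ifs <;> first
        | rfl
        | exact ih rem _
    | succ d ihd =>
      intro j hj path
      have hjlt : j < kn := by omega
      have hcond : capb - (b + (j : Int) * capa) > capa := by
        apply hF3; omega
      rw [wppOuter_step capa capb t n (b + (j : Int) * capa) path hcond hca]
      rw [roundLoop_inner capa capb t b bk rem kn j hjlt path]
      have hval : capa + (b + (j : Int) * capa) = b + ((j : Int) + 1) * capa := by ring
      rw [hval]
      split_ifs <;> first
        | rfl
        | (have := ihd (j + 1) (by omega)
             ((path.push (capa, b + (j : Int) * capa)).push (0, b + ((j : Int) + 1) * capa))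
           rw [show (((j : Nat) + 1 : Nat) : Int) = (j : Int) + 1 from by push_cast; ring] at this
           exact this)

-- ===== VERDICT (by name: the statement is the Claim_ definition above) =====
theorem wpp_spec : Claim_equal_wpp := by
  intro capa capb t _
  unfold Spec_wpp wpp wpp_alt
  by_cases h : capa ≤ 0
  · have h0 : capa.toNat = 0 := by omega
    rw [h0]
    rfl
  · exact congrArg Array.toList (bridge capa capb t (by omega) capa.toNat 0 #[])
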